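-- pv_equiv track=rewrite | github.com/s106062228/moneyprinter | src/publisher.py | _format_affiliate_links
-- ===== SOURCE A (Python) =====
-- def _format_affiliate_links(links: list, platform: str) -> str:
--     """Format affiliate links for a specific platform.
--
--     Args:
--         links: List of dicts with 'url' and 'label' keys.
--         platform: Target platform (youtube, tiktok, twitter, instagram).
--
--     Returns:
--         Formatted string to append to description. Empty string if no links.
--     """
--     if not links:
--         return ""
--
--     valid_links = [
--         lnk for lnk in links
--         if isinstance(lnk, dict) and lnk.get("url")
--     ]
--     if not valid_links:
--         return ""
--
--     if platform == "twitter":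
--         # Compact format for Twitter's character limit
--         parts = []
--         for lnk in valid_links:
--             label = lnk.get("label", "Link")
--             parts.append(f"{label}: {lnk['url']}")
--         return " | " + " | ".join(parts)
--
--     if platform == "instagram":
--         # Instagram doesn't support clickable links in descriptions
--         parts = []
--         for lnk in valid_links:
--             label = lnk.get("label", "Product")
--             parts.append(f"  {label} (link in bio)")
--         return "\n\n" + "\n".join(parts)
--
--     if platform == "tiktok":
--         parts = []
--         for lnk in valid_links:
--             label = lnk.get("label", "Link")
--             parts.append(f"  {label} -> {lnk['url']}")
--         return "\n\nLinks:\n" + "\n".join(parts)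
--
--     # YouTube and others: full format
--     parts = []
--     for lnk in valid_links:
--         label = lnk.get("label", "Link")
--         parts.append(f"  {label}: {lnk['url']}")
--     return "\n\nShop:\n" + "\n".join(parts)
-- ===== SOURCE B (Python) =====
-- def _format_affiliate_links(links: list, platform: str) -> str:
--     """Recursive one-pass reimplementation: no filter pass, no parts list, no join.
--
--     A single back-to-front recursion over links merges validity filtering,
--     per-item formatting and separator insertion into one traversal; the
--     header is prepended only if the recursion found at least one valid link.
--     """
--     def item(lnk):
--         if platform == "twitter":
--             return f"{lnk.get('label', 'Link')}: {lnk['url']}"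
--         if platform == "instagram":
--             return f"  {lnk.get('label', 'Product')} (link in bio)"
--         if platform == "tiktok":
--             return f"  {lnk.get('label', 'Link')} -> {lnk['url']}"
--         return f"  {lnk.get('label', 'Link')}: {lnk['url']}"
--
--     sep = " | " if platform == "twitter" else "\n"
--
--     def body(i):
--         # joined formatted items of links[i:], or None if none is valid
--         if i == len(links):
--             return None
--         tail = body(i + 1)
--         lnk = links[i]
--         if not (isinstance(lnk, dict) and lnk.get("url")):
--             return tail
--         it = item(lnk)
--         return it if tail is None else it + sep + tail
--
--     b = body(0)
--     if b is None:
--         return ""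
--     if platform == "twitter":
--         return " | " + b
--     if platform == "instagram":
--         return "\n\n" + b
--     if platform == "tiktok":
--         return "\n\nLinks:\n" + b
--     return "\n\nShop:\n" + b
-- ===== Notes on version B (the rewrite author's own statement) =====
-- stated objective: alternative
-- what changed: Replaces A's staged passes (filter into valid_links, then a per-platform accumulator loop building a parts list, then join) by one back-to-front recursion over links that filters, formats and inserts separators in a single traversal with an Option accumulator, prepending the header only when a valid link was found.
import Mathlib
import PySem

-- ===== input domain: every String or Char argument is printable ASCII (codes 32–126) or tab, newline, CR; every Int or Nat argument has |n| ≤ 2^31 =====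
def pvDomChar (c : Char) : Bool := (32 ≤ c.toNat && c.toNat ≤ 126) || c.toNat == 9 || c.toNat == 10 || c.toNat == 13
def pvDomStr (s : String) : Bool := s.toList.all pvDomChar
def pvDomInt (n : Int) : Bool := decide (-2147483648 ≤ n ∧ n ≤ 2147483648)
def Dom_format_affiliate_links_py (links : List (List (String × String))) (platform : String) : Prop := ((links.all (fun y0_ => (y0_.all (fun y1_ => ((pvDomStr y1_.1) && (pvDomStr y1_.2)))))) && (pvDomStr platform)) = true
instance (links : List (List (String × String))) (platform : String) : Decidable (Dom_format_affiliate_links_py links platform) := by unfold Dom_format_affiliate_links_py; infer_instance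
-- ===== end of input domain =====

-- B replaces A's staged passes (filter, per-platform parts loop, join) by one recursive
-- traversal that filters, formats and joins in a single pass (alternative decomposition; same output).


-- ===== PORT A =====
-- Literal transliteration of A: filter valid_links, then four platform branches, each an
-- accumulator loop building `parts`, then header ++ join.  (lnk['url'] is only read when
-- lnk.get("url") is truthy, so the total `getD ""` is exact there.)
def format_affiliate_links_py (links : List (List (String × String))) (platform : String) : String :=
  if links = [] then "" else
  let valid := links.filter (fun l => ((l.lookup "url").getD "") != "")
  if valid = [] then "" else
  if platform == "twitter" then
    let parts := valid.foldl (fun ps l =>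
      ps ++ [((l.lookup "label").getD "Link") ++ ": " ++ ((l.lookup "url").getD "")]) []
    " | " ++ PySem.Str.join " | " parts
  else if platform == "instagram" then
    let parts := valid.foldl (fun ps l =>
      ps ++ ["  " ++ ((l.lookup "label").getD "Product") ++ " (link in bio)"]) []
    "\n\n" ++ PySem.Str.join "\n" parts
  else if platform == "tiktok" then
    let parts := valid.foldl (fun ps l =>
      ps ++ ["  " ++ ((l.lookup "label").getD "Link") ++ " -> " ++ ((l.lookup "url").getD "")]) []
    "\n\nLinks:\n" ++ PySem.Str.join "\n" parts
  else
    let parts := valid.foldl (fun ps l =>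
      ps ++ ["  " ++ ((l.lookup "label").getD "Link") ++ ": " ++ ((l.lookup "url").getD "")]) []
    "\n\nShop:\n" ++ PySem.Str.join "\n" parts

-- ===== PORT B =====
-- Transliteration of B's helper `item(lnk)`: per-platform formatting of one link.
def pvAltItem (platform : String) (l : List (String × String)) : String :=
  if platform == "twitter" then ((l.lookup "label").getD "Link") ++ ": " ++ ((l.lookup "url").getD "")
  else if platform == "instagram" then "  " ++ ((l.lookup "label").getD "Product") ++ " (link in bio)"
  else if platform == "tiktok" then "  " ++ ((l.lookup "label").getD "Link") ++ " -> " ++ ((l.lookup "url").getD "")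
  else "  " ++ ((l.lookup "label").getD "Link") ++ ": " ++ ((l.lookup "url").getD "")

-- Transliteration of B's recursion `body(i)`: one back-to-front pass over links that
-- filters, formats and inserts separators; `none` = no valid link seen.
def pvAltBody (platform : String) (sep : String) : List (List (String × String)) → Option String
  | [] => none
  | l :: ls =>
    let tail := pvAltBody platform sep ls
    if ((l.lookup "url").getD "") != "" then
      let it := pvAltItem platform l
      some (match tail with | none => it | some t => it ++ sep ++ t)
    else tail

-- Transliteration of B: pick the separator, run the recursion, prepend the header.
def format_affiliate_links_py_alt (links : List (List (String × String))) (platform : String) : String :=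
  let sep := if platform == "twitter" then " | " else "\n"
  match pvAltBody platform sep links with
  | none => ""
  | some b =>
    if platform == "twitter" then " | " ++ b
    else if platform == "instagram" then "\n\n" ++ b
    else if platform == "tiktok" then "\n\nLinks:\n" ++ b
    else "\n\nShop:\n" ++ b

-- ===== PRECONDITION & SPEC =====
def Spec_format_affiliate_links_py (links : List (List (String × String))) (platform : String) (out : String) : Prop := out = format_affiliate_links_py_alt links platform
instance (links : List (List (String × String))) (platform : String) (out : String) : Decidable (Spec_format_affiliate_links_py links platform out) := by unfold Spec_format_affiliate_links_py; infer_instance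

-- ===== CLAIM =====
def Claim_equal_format_affiliate_links_py : Prop := ∀ (links : List (List (String × String))) (platform : String), Dom_format_affiliate_links_py links platform → Spec_format_affiliate_links_py links platform (format_affiliate_links_py links platform)

-- ===== LEMMAS AND PROOFS =====

theorem strJoin_singleton (sep a : String) : PySem.Str.join sep [a] = a := by
  simp [PySem.Str.join, PySem.Chars.join, List.intercalate]

theorem strJoin_cons_cons (sep a b : String) (r : List String) :
    PySem.Str.join sep (a :: b :: r) = a ++ sep ++ PySem.Str.join sep (b :: r) := by
  simp [PySem.Str.join, PySem.Chars.join, List.intercalate, String.append_assoc]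

-- B's recursion computes exactly "join sep of the formatted valid links, none if empty".
theorem pvAltBody_eq (platform sep : String) (links : List (List (String × String))) :
    pvAltBody platform sep links =
      match links.filter (fun l => ((l.lookup "url").getD "") != "") with
      | [] => none
      | vs => some (PySem.Str.join sep (vs.map (pvAltItem platform))) := by
  induction links with
  | nil => rfl
  | cons l ls ih =>
    by_cases h : (((l.lookup "url").getD "") != "") = true
    · simp only [pvAltBody, List.filter_cons, h, if_true, ih]
      cases hf : ls.filter (fun l => ((l.lookup "url").getD "") != "") with
      | nil => simp [strJoin_singleton]
      | cons v vs => simp [strJoin_cons_cons]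
    · rw [Bool.not_eq_true] at h
      simp only [pvAltBody, List.filter_cons, h, Bool.false_eq_true, if_false, ih]

-- ===== VERDICT =====
theorem format_affiliate_links_py_spec : Claim_equal_format_affiliate_links_py := by
  intro links platform _
  unfold Spec_format_affiliate_links_py format_affiliate_links_py format_affiliate_links_py_alt
  simp only [pvAltBody_eq]
  by_cases h0 : links = []
  · simp [h0]
  simp only [if_neg h0, PySem.List.foldl_append_singleton_eq_map, List.nil_append]
  cases hf : links.filter (fun l => ((l.lookup "url").getD "") != "") with
  | nil => simp
  | cons v vs =>
    simp only
    have hne : v :: vs ≠ ([] : List (List (String × String))) := by simp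
    simp only [if_neg hne]
    by_cases ht : (platform == "twitter") = true
    · simp only [ht, if_true]
      congr 2
      exact List.map_congr_left (fun x _ => by simp [pvAltItem, ht])
    rw [Bool.not_eq_true] at ht
    simp only [ht, Bool.false_eq_true, if_false]
    by_cases hi : (platform == "instagram") = true
    · simp only [hi, if_true]
      congr 2
      exact List.map_congr_left (fun x _ => by simp [pvAltItem, ht, hi])
    rw [Bool.not_eq_true] at hi
    simp only [hi, Bool.false_eq_true, if_false]
    by_cases hk : (platform == "tiktok") = true
    · simp only [hk, if_true]
      congr 2
      exact List.map_congr_left (fun x _ => by simp [pvAltItem, ht, hi, hk])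
    rw [Bool.not_eq_true] at hk
    simp only [hk, Bool.false_eq_true, if_false]
    congr 2
    exact List.map_congr_left (fun x _ => by simp [pvAltItem, ht, hi, hk])
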